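-- pv_equiv track=rewrite | github.com/oceane-sailorin/python-exercises | algorithms/nonrepeat.py | nonrepeat2
-- ===== SOURCE A (Python) =====
-- def nonrepeat2(string1):
--     string1 = string1.replace(' ','').lower()
--     dict = {}
--
--     for s in string1:
--         if s in dict:
--             dict[s] += 1
--         else:
--             dict[s] = 1
--
--     result = []
--
--     sorted_list = sorted(dict.items(), key=lambda x : x[1])
--
--     for item in sorted_list:
--         if item[1] == sorted_list[0][1]:
--             result.append(item[0])
--
--     return result
-- ===== SOURCE B (Python) =====
-- def nonrepeat2(string1):
--     s = string1.replace(' ', '').lower()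
--     counts = {}
--     for c in s:
--         counts[c] = counts.get(c, 0) + 1
--     if not counts:
--         return []
--     buckets = {}
--     for ch, n in counts.items():
--         buckets.setdefault(n, []).append(ch)
--     return buckets[min(buckets)]
-- ===== Notes on version B (the rewrite author's own statement) =====
-- stated objective: alternative
-- what changed: Replaces sort-items-then-filter-against-the-first-element's-count with a frequency->characters bucket dict built in one pass, returning the bucket of the minimum count key (no sorting).
import Mathlib
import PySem

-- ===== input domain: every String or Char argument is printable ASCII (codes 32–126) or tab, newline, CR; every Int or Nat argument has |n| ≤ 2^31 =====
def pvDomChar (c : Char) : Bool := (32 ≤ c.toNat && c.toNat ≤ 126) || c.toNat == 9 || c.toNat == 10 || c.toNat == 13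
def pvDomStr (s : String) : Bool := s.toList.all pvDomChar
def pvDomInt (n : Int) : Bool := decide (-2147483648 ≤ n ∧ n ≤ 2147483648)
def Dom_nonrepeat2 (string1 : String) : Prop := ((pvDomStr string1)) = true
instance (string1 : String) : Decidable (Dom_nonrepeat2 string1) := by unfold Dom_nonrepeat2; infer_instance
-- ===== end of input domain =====

-- B replaces A's sort-items-then-filter-against-the-first-count with a count→chars bucket
-- dict built in one pass and a lookup at the minimum count key (no sorting); same values everywhere.

-- ===== PORT A =====
-- string1.replace(' ','').lower(), as a char list
def pvNorm (string1 : String) : List Char :=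
  (PySem.Str.lower (PySem.Str.replace string1 " " "")).toList

-- for s in string1: if s in dict: dict[s] += 1 else: dict[s] = 1
-- (dict[s] += 1 reads the present key: getD's default 0 is never read on that branch)
def pvCountA (l : List Char) : PySem.Dict Char Int :=
  l.foldl (fun d c => if d.contains c then d.insert c (d.getD c 0 + 1) else d.insert c 1)
    PySem.Dict.empty

-- for item in sorted_list: if item[1] == sorted_list[0][1]: result.append(item[0])
-- the loop body only runs when sl is nonempty, so pyGetD's default pair is never read
def pvSelectMin (sl : List (Char × Int)) : List String :=
  sl.foldl
    (fun result item =>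
      if item.2 == (PySem.List.pyGetD sl 0 (Char.ofNat 0, (0 : Int))).2 then
        result ++ [String.ofList [item.1]]
      else result) []

def nonrepeat2 (string1 : String) : List String :=
  pvSelectMin (PySem.List.sorted (pvCountA (pvNorm string1)).items (fun x => x.2) false)

-- ===== PORT B =====
-- counts[c] = counts.get(c, 0) + 1
def pvCountB (l : List Char) : PySem.Dict Char Int :=
  l.foldl (fun d c => d.insert c (d.getD c 0 + 1)) PySem.Dict.empty

-- for ch, n in counts.items(): buckets.setdefault(n, []).append(ch)
def pvBuckets (items : List (Char × Int)) : PySem.Dict Int (List Char) :=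
  items.foldl (fun b p => b.modify p.2 [] (fun l => l ++ [p.1])) PySem.Dict.empty

def nonrepeat2_alt (string1 : String) : List String :=
  if (pvCountB (pvNorm string1)).items = [] then []
  else
    -- min(buckets) iterates the keys; buckets[m]: m is a present key here, default never read
    match PySem.List.min? (pvBuckets (pvCountB (pvNorm string1)).items).keys (fun k => k) with
    | none => []
    | some m =>
      ((pvBuckets (pvCountB (pvNorm string1)).items).getD m []).map (fun c => String.ofList [c])

-- ===== PRECONDITION & SPEC =====
def Spec_nonrepeat2 (string1 : String) (out : List String) : Prop := out = nonrepeat2_alt string1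
instance (string1 : String) (out : List String) : Decidable (Spec_nonrepeat2 string1 out) := by unfold Spec_nonrepeat2; infer_instance

-- ===== CLAIM (what is proved, stated in full; the proofs are below) =====
def Claim_equal_nonrepeat2 : Prop := ∀ (string1 : String), Dom_nonrepeat2 string1 → Spec_nonrepeat2 string1 (nonrepeat2 string1)

-- ===== LEMMAS AND PROOFS =====

-- the two counting loops build the same dict
theorem pvCountA_eq_pvCountB (l : List Char) : pvCountA l = pvCountB l := by
  unfold pvCountA pvCountB
  congr 1
  funext d c
  by_cases h : d.contains c
  · simp [h]
  · simp only [h, Bool.false_eq_true, if_false]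
    rw [PySem.Dict.getD_of_not_contains d 0 (by simpa using h)]
    norm_num

-- inserting into an ascending list commutes with filtering at an exact key value
theorem pv_filter_insertBy {α : Type} (key : α → Int) (c : Int) (x : α) (l : List α)
    (hs : l.Pairwise (fun a b => key a ≤ key b)) :
    (PySem.List.insertBy (fun a b => decide (key a < key b)) x l).filter (fun y => key y == c)
      = l.filter (fun y => key y == c) ++ [x].filter (fun y => key y == c) := by
  induction l with
  | nil => simp [PySem.List.insertBy]
  | cons y ys ih =>
    rw [List.pairwise_cons] at hs
    by_cases h : key x < key y
    · rw [show PySem.List.insertBy (fun a b => decide (key a < key b)) x (y :: ys)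
          = x :: y :: ys by simp [PySem.List.insertBy, h]]
      by_cases hc : key x = c
      · have hall : ∀ z ∈ y :: ys, ¬ (key z = c) := by
          intro z hz
          rcases List.mem_cons.mp hz with rfl | hz
          · omega
          · have := hs.1 z hz; omega
        rw [List.filter_cons_of_pos (by simp [hc])]
        rw [List.filter_eq_nil_iff.mpr (by intro z hz; simpa using hall z hz)]
        simp [hc]
      · rw [List.filter_cons_of_neg (by simpa using hc)]
        simp [hc]
    · rw [show PySem.List.insertBy (fun a b => decide (key a < key b)) x (y :: ys)
          = y :: PySem.List.insertBy (fun a b => decide (key a < key b)) x ys by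
            simp [PySem.List.insertBy, h]]
      rw [List.filter_cons, List.filter_cons, ih hs.2]
      by_cases hy : key y = c <;> simp [hy]

-- stability of Python's sort at an exact key value: filtering one key class commutes with sorting
theorem pv_filter_sorted {α : Type} (key : α → Int) (c : Int) (xs : List α) :
    (PySem.List.sorted xs key false).filter (fun y => key y == c)
      = xs.filter (fun y => key y == c) := by
  induction xs using List.reverseRecOn with
  | nil => simp [PySem.List.sorted]
  | append_singleton xs x ih =>
    rw [PySem.List.sorted_eq_foldl_insertBy, List.foldl_append, List.foldl_cons, List.foldl_nil,
      ← PySem.List.sorted_eq_foldl_insertBy,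
      pv_filter_insertBy key c x _ (PySem.List.sorted_pairwise xs key), ih, List.filter_append]

-- A's selection loop on a nonempty sorted list is filter-at-head-count then map
theorem pvSelectMin_cons (h : Char × Int) (t : List (Char × Int)) :
    pvSelectMin (h :: t)
      = ((h :: t).filter (fun y => y.2 == h.2)).map (fun y => String.ofList [y.1]) := by
  unfold pvSelectMin
  rw [PySem.List.pyGetD_zero_cons]
  simp only [PySem.List.foldl_append_if]
  simp

-- B's bucket at count m holds exactly the chars of count m, in items order
theorem pvBuckets_getD (items : List (Char × Int)) (m : Int) :
    (pvBuckets items).getD m [] = ((items.filter (fun p => p.2 == m)).map (fun p => p.1)) := by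
  unfold pvBuckets
  rw [show (List.foldl (fun b p => b.modify p.2 [] (fun l => l ++ [p.1])) PySem.Dict.empty items)
      = (List.foldl (fun b q => b.modify q.1 [] (fun l => l ++ [q.2])) PySem.Dict.empty
          (items.map (fun p => (p.2, p.1)))) by rw [List.foldl_map]]
  rw [PySem.Dict.getD_foldl_modify_append]
  simp [List.filter_map, Function.comp_def]

-- B's bucket keys are exactly the counts occurring in items
theorem pvBuckets_mem_keys (items : List (Char × Int)) (m : Int) :
    m ∈ (pvBuckets items).keys ↔ m ∈ items.map (fun p => p.2) := by
  unfold pvBuckets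
  rw [PySem.Dict.keys_foldl_modify_key items (fun p => p.2) [] (fun _ p l => l ++ [p.1])]
  rw [PySem.Dict.keys_empty]
  rw [show PySem.Set.update [] (items.map (fun p => p.2))
      = PySem.Set.ofList (items.map (fun p => p.2)) from rfl]
  exact PySem.Set.mem_ofList _ _

-- ===== VERDICT (by name: the statement is the Claim_ definition above) =====
theorem nonrepeat2_spec : Claim_equal_nonrepeat2 := by
  intro string1 _
  unfold Spec_nonrepeat2 nonrepeat2 nonrepeat2_alt
  rw [pvCountA_eq_pvCountB]
  by_cases hnil : (pvCountB (pvNorm string1)).items = []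
  · rw [if_pos hnil, hnil]
    simp [pvSelectMin, PySem.List.sorted]
  · rw [if_neg hnil]
    cases hsl : PySem.List.sorted (pvCountB (pvNorm string1)).items (fun x => x.2) false with
    | nil => exact absurd ((PySem.List.sorted_eq_nil_iff _ _ _).mp hsl) hnil
    | cons h t =>
      have hh : h ∈ (pvCountB (pvNorm string1)).items :=
        (PySem.List.mem_sorted _ _ _ _).mp (by rw [hsl]; exact List.mem_cons_self)
      cases hm : PySem.List.min? (pvBuckets (pvCountB (pvNorm string1)).items).keys
          (fun k => k) with
      | none =>
        exfalso
        have hkeys := (PySem.List.min?_eq_none_iff _ _).mp hm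
        have : h.2 ∈ (pvBuckets (pvCountB (pvNorm string1)).items).keys :=
          (pvBuckets_mem_keys _ h.2).mpr (List.mem_map_of_mem hh)
        rw [hkeys] at this
        exact absurd this (List.not_mem_nil)
      | some m =>
        have hmh : m ≤ h.2 :=
          PySem.List.min?_isMin hm h.2 ((pvBuckets_mem_keys _ h.2).mpr (List.mem_map_of_mem hh))
        have hhm : h.2 ≤ m := by
          have hmem : m ∈ (pvCountB (pvNorm string1)).items.map (fun p => p.2) :=
            (pvBuckets_mem_keys _ m).mp (PySem.List.min?_mem hm)
          obtain ⟨y, hy, hym⟩ := List.mem_map.mp hmem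
          have := PySem.List.key_head_sorted_le _ _ hsl y hy
          omega
        have hmeq : m = h.2 := le_antisymm hmh hhm
        show pvSelectMin (h :: t)
          = ((pvBuckets (pvCountB (pvNorm string1)).items).getD m []).map
              (fun c => String.ofList [c])
        rw [pvSelectMin_cons, pvBuckets_getD, hmeq, ← hsl,
          pv_filter_sorted (fun y : Char × Int => y.2) h.2, List.map_map]
        rfl
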